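-- pv_equiv track=rewrite | github.com/pulp-platform/neureka | ucode/uloop_common.py | uloop_get_loops
-- ===== SOURCE A (Python) =====
-- def uloop_get_loops(loops_ops, loops_range):
--     loops = []
--     a = 0
--     for o,r in zip(loops_ops, loops_range):
--         l = {}
--         l['nb_ops']     = o
--         l['range']      = r
--         l['uloop_addr'] = a
--         a += o
--         loops.append(l)
--     return loops
-- ===== SOURCE B (Python) =====
-- def uloop_get_loops(loops_ops, loops_range):
--     # accumulator-free: address of loop i is the sum of the ops of all earlier loops
--     n = min(len(loops_ops), len(loops_range))
--     return [{'nb_ops': loops_ops[i],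
--              'range': loops_range[i],
--              'uloop_addr': sum(loops_ops[:i])}
--             for i in range(n)]
-- ===== Notes on version B (the rewrite author's own statement) =====
-- stated objective: alternative
-- what changed: Removes the running accumulator entirely: B indexes over range(min(len,len)) and computes each loop's address independently as the slice sum sum(loops_ops[:i]), trading the single-pass threaded state for per-element closed-form sums (O(n^2) but n is a handful of loop levels).
import Mathlib
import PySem

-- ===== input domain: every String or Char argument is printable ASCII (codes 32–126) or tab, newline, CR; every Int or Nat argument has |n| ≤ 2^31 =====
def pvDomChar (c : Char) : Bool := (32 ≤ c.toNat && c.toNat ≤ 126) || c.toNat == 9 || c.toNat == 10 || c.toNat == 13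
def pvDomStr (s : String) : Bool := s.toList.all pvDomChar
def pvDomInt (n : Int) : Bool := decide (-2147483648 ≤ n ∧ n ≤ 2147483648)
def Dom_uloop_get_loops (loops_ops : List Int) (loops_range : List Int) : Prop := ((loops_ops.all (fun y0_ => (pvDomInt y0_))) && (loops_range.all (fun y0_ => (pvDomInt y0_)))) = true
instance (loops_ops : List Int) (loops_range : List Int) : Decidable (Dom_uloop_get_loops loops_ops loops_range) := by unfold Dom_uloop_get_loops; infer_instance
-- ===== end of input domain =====

-- B drops the running accumulator: it indexes the loops and computes each address
-- independently as the slice sum sum(loops_ops[:i]) (alternative decomposition, O(n^2)).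

-- ===== PORT A =====
-- A: one loop over zip(loops_ops, loops_range) threading (loops, a).
def uloop_get_loops (loops_ops : List Int) (loops_range : List Int) : List (List (String × Int)) :=
  (((loops_ops.zip loops_range).foldl
      (fun (st : List (List (String × Int)) × Int) or_ =>
        (st.1 ++ [[("nb_ops", or_.1), ("range", or_.2), ("uloop_addr", st.2)]], st.2 + or_.1))
      ([], 0))).1

-- ===== PORT B =====
-- B: comprehension over range(n), n = min of the lengths; each index i of range(n) is a
-- valid nonnegative index, so loops_ops[i] is getD i 0 and loops_ops[:i] is take i (exact here),
-- and sum(...) is List.sum.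
def uloop_get_loops_alt (loops_ops : List Int) (loops_range : List Int) : List (List (String × Int)) :=
  (List.range (min loops_ops.length loops_range.length)).map (fun i =>
    [("nb_ops", loops_ops.getD i 0),
     ("range", loops_range.getD i 0),
     ("uloop_addr", (loops_ops.take i).sum)])

-- ===== PRECONDITION & SPEC =====
def Spec_uloop_get_loops (loops_ops : List Int) (loops_range : List Int) (out : List (List (String × Int))) : Prop := out = uloop_get_loops_alt loops_ops loops_range
instance (loops_ops : List Int) (loops_range : List Int) (out : List (List (String × Int))) : Decidable (Spec_uloop_get_loops loops_ops loops_range out) := by unfold Spec_uloop_get_loops; infer_instance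

-- ===== CLAIM =====
def Claim_equal_uloop_get_loops : Prop := ∀ (loops_ops : List Int) (loops_range : List Int), Dom_uloop_get_loops loops_ops loops_range → Spec_uloop_get_loops loops_ops loops_range (uloop_get_loops loops_ops loops_range)

-- ===== LEMMAS AND PROOFS =====

-- A's fold, generalized over the accumulator pair: every processed element appends one
-- record whose address is the starting offset `a` plus the sum of the earlier ops.
theorem uloop_foldl (l r : List Int) (acc : List (List (String × Int))) (a : Int) :
    (((l.zip r).foldl
        (fun (st : List (List (String × Int)) × Int) or_ =>
          (st.1 ++ [[("nb_ops", or_.1), ("range", or_.2), ("uloop_addr", st.2)]], st.2 + or_.1))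
        (acc, a))).1
      = acc ++ (List.range (min l.length r.length)).map (fun i =>
          [("nb_ops", l.getD i 0),
           ("range", r.getD i 0),
           ("uloop_addr", a + (l.take i).sum)]) := by
  induction l generalizing r acc a with
  | nil => simp
  | cons o t ih =>
    cases r with
    | nil => simp
    | cons rr r' =>
      simp only [List.zip_cons_cons, List.foldl_cons]
      rw [ih]
      have hmin : min (o :: t).length (rr :: r').length
          = min t.length r'.length + 1 := by simp [Nat.succ_min_succ]
      rw [hmin, List.range_succ_eq_map]
      simp only [List.map_cons, List.map_map]
      simp only [List.getD, List.append_assoc, List.singleton_append, Function.comp_def]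
      congr 2
      · simp
      · apply List.map_congr_left
        intro i _
        simp [List.sum_cons]
        ring

-- ===== VERDICT =====
theorem uloop_get_loops_spec : Claim_equal_uloop_get_loops := by
  intro l r _
  unfold Spec_uloop_get_loops uloop_get_loops uloop_get_loops_alt
  have := uloop_foldl l r [] 0
  simpa using this
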